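-- pv_equiv track=rewrite | github.com/zq-zhan/Algorithm_updating | 2025每日一题/202504/20250421统计隐藏数组数目.py | numberOfArrays
-- ===== SOURCE A (Python) =====
-- from functools import cache
--
-- def numberOfArrays(differences, lower, upper):
-- 	ans = True
-- 	n = len(differences)
-- 	@cache
-- 	def dfs(i, c):
-- 		if i < 1:
-- 			return True
-- 		if lower <= c - differences[i - 1] <= upper:
-- 			return dfs(i - 1, c - differences[i - 1])
-- 		else:
-- 			return False
--
-- 	return sum(int(dfs(n, x)) for x in range(lower, upper + 1))
-- ===== SOURCE B (Python) =====
-- def numberOfArrays(differences, lower, upper):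
--     s = mn = mx = 0
--     for d in differences:
--         s += d
--         mn = min(mn, s)
--         mx = max(mx, s)
--     return max(0, (upper - lower) - (mx - mn) + 1)
-- ===== Notes on version B (the rewrite author's own statement) =====
-- stated objective: alternative
-- what changed: Replaced the per-candidate memoized backward search over every x in [lower,upper] by a single pass computing prefix-sum min/max and the closed-form count max(0,(upper-lower)-(mx-mn)+1).
import Mathlib
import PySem

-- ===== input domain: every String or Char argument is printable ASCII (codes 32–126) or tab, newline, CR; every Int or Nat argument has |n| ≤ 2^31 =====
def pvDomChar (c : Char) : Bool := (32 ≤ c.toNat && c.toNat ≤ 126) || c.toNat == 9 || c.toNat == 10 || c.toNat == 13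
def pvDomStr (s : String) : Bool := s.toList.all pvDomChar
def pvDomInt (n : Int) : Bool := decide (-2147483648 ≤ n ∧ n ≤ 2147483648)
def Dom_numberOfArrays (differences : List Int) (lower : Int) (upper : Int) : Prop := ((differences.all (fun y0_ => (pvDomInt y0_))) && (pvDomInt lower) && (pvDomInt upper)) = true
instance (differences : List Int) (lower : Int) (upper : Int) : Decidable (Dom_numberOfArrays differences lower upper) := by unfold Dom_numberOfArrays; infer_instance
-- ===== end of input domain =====

-- B replaces A's per-candidate memoized backward search over range(lower, upper+1) by one
-- prefix-sum min/max pass and a closed-form count (objective: alternative algorithm).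

-- ===== PORT A =====
-- dfs(i, c): the recursion on i; differences[i-1] is always in range on A's actual calls
-- (1 ≤ i ≤ len(differences)), ported with getD 0 which is exact there.
def pvDfs (differences : List Int) (lower upper : Int) : Nat → Int → Bool
  | 0, _ => true
  | i + 1, c =>
      let d := differences.getD i 0
      if lower ≤ c - d ∧ c - d ≤ upper then pvDfs differences lower upper i (c - d)
      else false

def numberOfArrays (differences : List Int) (lower : Int) (upper : Int) : Int :=
  ((PySem.List.pyRange lower (upper + 1) 1).map
    (fun x => if pvDfs differences lower upper differences.length x then (1 : Int) else 0)).sum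

-- ===== PORT B =====
def numberOfArrays_alt (differences : List Int) (lower : Int) (upper : Int) : Int :=
  let st := differences.foldl
    (fun (st : Int × Int × Int) d =>
      let s := st.1 + d
      (s, min st.2.1 s, max st.2.2 s)) (0, 0, 0)
  max 0 ((upper - lower) - (st.2.2 - st.2.1) + 1)

-- ===== PRECONDITION & SPEC =====
def Spec_numberOfArrays (differences : List Int) (lower : Int) (upper : Int) (out : Int) : Prop := out = numberOfArrays_alt differences lower upper
instance (differences : List Int) (lower : Int) (upper : Int) (out : Int) : Decidable (Spec_numberOfArrays differences lower upper out) := by unfold Spec_numberOfArrays; infer_instance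

-- ===== CLAIM (what is proved, stated in full; the proofs are below) =====
def Claim_equal_numberOfArrays : Prop := ∀ (differences : List Int) (lower : Int) (upper : Int), Dom_numberOfArrays differences lower upper → Spec_numberOfArrays differences lower upper (numberOfArrays differences lower upper)

-- ===== LEMMAS AND PROOFS =====

-- nonempty-prefix partial sums starting from accumulator s
def pvPsums (s : Int) : List Int → List Int
  | [] => []
  | d :: r => (s + d) :: pvPsums (s + d) r

-- prefix sum of the first j elements
def pvPref (l : List Int) (j : Nat) : Int := (l.take j).sum

lemma pvPref_succ (l : List Int) (i : Nat) (hi : i < l.length) :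
    pvPref l (i + 1) = pvPref l i + l.getD i 0 := by
  unfold pvPref
  rw [List.sum_take_succ l i hi, List.getD_eq_getElem l 0 hi]

lemma pvPref_cons (d : Int) (r : List Int) (j : Nat) :
    pvPref (d :: r) (j + 1) = d + pvPref r j := by
  simp [pvPref]

lemma pvFold_inv (l : List Int) : ∀ (s mn mx : Int),
    l.foldl (fun (st : Int × Int × Int) d =>
      let s := st.1 + d
      (s, min st.2.1 s, max st.2.2 s)) (s, mn, mx)
    = (s + l.sum, (pvPsums s l).foldl min mn, (pvPsums s l).foldl max mx) := by
  induction l with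
  | nil => intro s mn mx; simp [pvPsums]
  | cons d r ih =>
      intro s mn mx
      simp only [List.foldl_cons, List.sum_cons, pvPsums]
      rw [ih, add_assoc]

lemma pvMem_psums (l : List Int) : ∀ (s p : Int),
    p ∈ pvPsums s l ↔ ∃ j, 1 ≤ j ∧ j ≤ l.length ∧ p = s + pvPref l j := by
  induction l with
  | nil => intro s p; simp [pvPsums]
  | cons d r ih =>
      intro s p
      simp only [pvPsums, List.mem_cons, ih]
      constructor
      · rintro (rfl | ⟨j, h1, h2, rfl⟩)
        · exact ⟨1, le_refl 1, by simp, by simp [pvPref]⟩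
        · refine ⟨j + 1, by omega, by simp; omega, ?_⟩
          rw [pvPref_cons]; ring
      · rintro ⟨j, h1, h2, rfl⟩
        match j, h1 with
        | 1, _ => left; simp [pvPref]
        | (k+2), _ =>
            right
            refine ⟨k + 1, by omega, by simp at h2 ⊢; omega, ?_⟩
            rw [pvPref_cons]; ring

-- characterization of A's dfs: all backward partial differences stay in bounds
lemma pvDfs_char (l : List Int) (lo hi : Int) : ∀ (i : Nat), i ≤ l.length → ∀ c,
    (pvDfs l lo hi i c = true ↔
      ∀ j < i, lo ≤ c - (pvPref l i - pvPref l j) ∧ c - (pvPref l i - pvPref l j) ≤ hi) := by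
  intro i
  induction i with
  | zero =>
      intro _ c
      exact ⟨fun _ j hj => absurd hj (Nat.not_lt_zero j), fun _ => rfl⟩
  | succ i ih =>
      intro hle c
      have hlt : i < l.length := by omega
      have hstep := pvPref_succ l i hlt
      simp only [pvDfs]
      set d := l.getD i 0 with hd
      by_cases hcond : lo ≤ c - d ∧ c - d ≤ hi
      · rw [if_pos hcond, ih (by omega) (c - d)]
        constructor
        · intro h j hj
          rcases Nat.lt_succ_iff_lt_or_eq.mp hj with hj' | rfl
          · have := h j hj'; constructor <;> [skip; skip] <;> omega
          · constructor <;> omega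
        · intro h j hj
          have := h j (by omega); constructor <;> omega
      · rw [if_neg hcond]
        simp only [Bool.false_eq_true, false_iff]
        intro h
        have := h i (by omega)
        apply hcond
        constructor <;> omega

-- counting lemma: number of x in range(a,b) with A ≤ x ≤ B, closed form
lemma pvCount (A B : Int) : ∀ (k : Nat) (a b : Int), b - a ≤ (k : Int) →
    ((PySem.List.pyRange a b 1).map (fun x => if A ≤ x ∧ x ≤ B then (1 : Int) else 0)).sum
      = max 0 (min b (B + 1) - max a A) := by
  intro k
  induction k with
  | zero =>
      intro a b h
      rw [PySem.List.pyRange_one_eq_nil (by omega)]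
      simp; omega
  | succ k ih =>
      intro a b h
      by_cases hab : b ≤ a
      · rw [PySem.List.pyRange_one_eq_nil hab]; simp; omega
      · rw [PySem.List.pyRange_one_cons (by omega)]
        simp only [List.map_cons, List.sum_cons, ih (a + 1) b (by omega)]
        by_cases hx : A ≤ a ∧ a ≤ B
        · rw [if_pos hx]; omega
        · rw [if_neg hx]; omega

-- ===== VERDICT (by name: the statement is the Claim_ definition above) =====
theorem numberOfArrays_spec : Claim_equal_numberOfArrays := by
  intro l lo hi _
  unfold Spec_numberOfArrays numberOfArrays
  set MN := (pvPsums 0 l).foldl min 0 with hMN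
  set MX := (pvPsums 0 l).foldl max 0 with hMX
  set S := l.sum with hS
  -- bounds and attainment for MN / MX over {0} ∪ psums
  have hminle := PySem.List.foldl_min_le (pvPsums 0 l) 0
  have hlemax := PySem.List.le_foldl_max (pvPsums 0 l) 0
  have hminmem := PySem.List.foldl_min_mem (pvPsums 0 l) 0
  have hmaxmem := PySem.List.foldl_max_mem (pvPsums 0 l) 0
  -- S is one of the partial sums (j = length, or 0 for the empty list)
  have hSmem : S = 0 ∨ S ∈ pvPsums 0 l := by
    cases l with
    | nil => left; simp [hS]
    | cons d r =>
        right
        rw [pvMem_psums]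
        exact ⟨(d :: r).length, by simp, le_refl _, by simp [pvPref, hS]⟩
  have hMNS : MN ≤ S := by
    rcases hSmem with h0 | hm
    · rw [h0]; exact hminle.1
    · exact hminle.2 S hm
  have hMXS : S ≤ MX := by
    rcases hSmem with h0 | hm
    · rw [h0]; exact hlemax.1
    · exact hlemax.2 S hm
  -- rewrite the indicator on members of the range to an interval test
  have hcong : ∀ x ∈ PySem.List.pyRange lo (hi + 1) 1,
      (if pvDfs l lo hi l.length x then (1 : Int) else 0)
        = (if lo + (S - MN) ≤ x ∧ x ≤ hi + (S - MX) then (1 : Int) else 0) := by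
    intro x hx
    rw [PySem.List.mem_pyRange_one] at hx
    congr 1
    rw [eq_iff_iff, pvDfs_char l lo hi l.length (le_refl _) x]
    have hprefS : pvPref l l.length = S := by simp [pvPref, hS]
    constructor
    · intro h
      -- instantiate at the minimizing / maximizing partial sum
      have key : ∀ p, p = 0 ∨ p ∈ pvPsums 0 l → lo ≤ x - (S - p) ∧ x - (S - p) ≤ hi := by
        intro p hp
        rcases hp with rfl | hm
        · rcases Nat.eq_zero_or_pos l.length with h0 | hpos
          · have : pvPref l l.length = pvPref l 0 := by rw [h0]
            have h00 : pvPref l 0 = 0 := by simp [pvPref]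
            omega
          · have h0 := h 0 hpos
            have h00 : pvPref l 0 = 0 := by simp [pvPref]
            omega
        · rw [pvMem_psums] at hm
          obtain ⟨j, hj1, hj2, rfl⟩ := hm
          rcases Nat.lt_or_ge j l.length with hjlt | hjge
          · have hj := h j hjlt
            omega
          · have : j = l.length := by omega
            subst this
            omega
      have h1 := key _ hminmem
      have h2 := key _ hmaxmem
      constructor <;> omega
    · intro hint j hj
      have hjmem : pvPref l j = 0 ∨ pvPref l j ∈ pvPsums 0 l := by
        cases j with
        | zero => left; simp [pvPref]
        | succ j' =>
            right
            rw [pvMem_psums]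
            exact ⟨j' + 1, by omega, by omega, by simp⟩
      have hlo : MN ≤ pvPref l j := by
        rcases hjmem with h0 | hm
        · rw [h0]; exact hminle.1
        · exact hminle.2 _ hm
      have hhi : pvPref l j ≤ MX := by
        rcases hjmem with h0 | hm
        · rw [h0]; exact hlemax.1
        · exact hlemax.2 _ hm
      constructor <;> omega
  have hB : numberOfArrays_alt l lo hi = max 0 ((hi - lo) - (MX - MN) + 1) := by
    unfold numberOfArrays_alt
    rw [pvFold_inv]
  rw [List.map_congr_left hcong,
      pvCount (lo + (S - MN)) (hi + (S - MX)) (hi + 1 - lo).toNat lo (hi + 1) (by omega), hB]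
  omega
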